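-- pv_equiv track=rewrite | github.com/miliar/Code_Jam_Webscraper | solutions_python/Problem_34/248.py | process
-- ===== SOURCE A (Python) =====
-- def transform(pattern):
--     a = False
--     newpat = []
--     for eachchar in pattern:
--         if eachchar == '(':
--             smalllist = []
--             a = True
--             continue
--         if eachchar == ')':
--             a = False
--             newpat.append(smalllist)
--             continue
--         if a:
--             smalllist.append(eachchar)
--         else:
--             newpat.append(eachchar)
--     return newpat
--
-- def process(casenum, casedata):
--     #### CHANGE HERE ####
--     numlettes, words, pattern = casedata
--
--     newpattern = transform(pattern)
--
--     count = 0
--     for eachword in words: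
--         found = True
--         for eachchar, eachpat in zip(eachword, newpattern):
--             if eachchar not in eachpat:
--                 found = False
--                 break
--         if found:
--             count +=1
--
--     #print count
--     return count
-- ===== SOURCE B (Python) =====
-- def process(casenum, casedata):
--     numlettes, words, pattern = casedata
--     # parse pattern into per-position lists of allowed characters
--     allowed = []
--     grouping = False
--     for ch in pattern:
--         if ch == '(':
--             group = []
--             grouping = True
--         elif ch == ')':
--             grouping = False
--             allowed.append(group)
--         elif grouping:
--             group.append(ch)
--         else:
--             allowed.append([ch])
--     # column-by-column: shrink the candidate list one pattern position at a time;
--     # positions beyond the longest word keep every word, so stop there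
--     candidates = list(words)
--     limit = 0
--     for w in candidates:
--         limit = max(limit, len(w))
--     for i, chars in enumerate(allowed[:limit]):
--         candidates = [w for w in candidates if len(w) <= i or w[i] in chars]
--     return len(candidates)
-- ===== Notes on version B (the rewrite author's own statement) =====
-- stated objective: alternative
-- what changed: B filters the word list column-by-column (one pattern position at a time, shrinking a candidate list) instead of A's word-by-word inner loop over zipped positions; words shorter than the current position are kept, matching zip's truncation.
import Mathlib
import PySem

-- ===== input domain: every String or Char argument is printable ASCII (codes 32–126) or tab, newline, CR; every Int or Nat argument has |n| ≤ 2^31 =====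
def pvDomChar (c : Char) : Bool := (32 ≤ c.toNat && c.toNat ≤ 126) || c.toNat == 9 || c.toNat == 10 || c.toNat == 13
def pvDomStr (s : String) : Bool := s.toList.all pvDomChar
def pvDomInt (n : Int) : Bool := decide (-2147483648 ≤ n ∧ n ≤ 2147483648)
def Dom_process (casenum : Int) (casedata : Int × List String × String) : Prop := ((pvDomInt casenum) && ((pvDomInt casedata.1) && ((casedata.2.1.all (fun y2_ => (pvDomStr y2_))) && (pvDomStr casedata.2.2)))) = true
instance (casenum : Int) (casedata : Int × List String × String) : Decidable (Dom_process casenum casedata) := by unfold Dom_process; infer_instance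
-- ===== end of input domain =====

-- B filters the word list column-by-column with a shrinking candidate list instead of A's
-- word-by-word inner loop over zipped positions (alternative decomposition, same cost).


-- ===== PORT A =====
-- pattern elements: a bare character or a parenthesised group (Python: str vs list)
inductive PatElt where
  | chr : Char → PatElt
  | grp : List Char → PatElt
deriving DecidableEq, Repr

-- 'eachchar in eachpat' for both element shapes
def memElt (c : Char) : PatElt → Bool
  | .chr d => c == d
  | .grp l => l.contains c

-- transform: state (a, smalllist, newpat); smalllist starts as [] (in Python it is
-- unbound until the first '(' — Pre_ keeps us away from a ')' before any '(')
def transformA (pattern : List Char) : List PatElt :=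
  (pattern.foldl
    (fun (st : Bool × List Char × List PatElt) c =>
      if c = '(' then (true, [], st.2.2)
      else if c = ')' then (false, st.2.1, st.2.2 ++ [PatElt.grp st.2.1])
      else if st.1 then (st.1, st.2.1 ++ [c], st.2.2)
      else (st.1, st.2.1, st.2.2 ++ [PatElt.chr c]))
    (false, [], [])).2.2

-- inner 'for … in zip: if not …: found = False; break'
def checkWordA : List (Char × PatElt) → Bool
  | [] => true
  | (c, p) :: rest => if !(memElt c p) then false else checkWordA rest

def process (casenum : Int) (casedata : Int × List String × String) : Int :=
  let newpattern := transformA casedata.2.2.toList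
  casedata.2.1.foldl
    (fun count w => if checkWordA (w.toList.zip newpattern) then count + 1 else count) 0

-- ===== PORT B =====
-- recursive parse into per-position lists of allowed characters
def parseB (grouping : Bool) (group : List Char) : List Char → List (List Char)
  | [] => []
  | c :: rest =>
    if c = '(' then parseB true [] rest
    else if c = ')' then group :: parseB false group rest
    else if grouping then parseB true (group ++ [c]) rest
    else [c] :: parseB grouping group rest

-- keep w if it is too short for position i (zip truncation) or w[i] is allowed
def keepB (i : Int) (chars : List Char) (w : String) : Bool :=
  decide (PySem.Str.len w ≤ i) ||
    (match PySem.Str.pyGet? w i with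
     | some c => chars.contains c
     | none => false)

def process_alt (casenum : Int) (casedata : Int × List String × String) : Int :=
  let allowed := parseB false [] casedata.2.2.toList
  let candidates := casedata.2.1
  -- positions beyond the longest word keep every word, so stop there
  let limit := candidates.foldl (fun m w => max m (PySem.Str.len w)) 0
  let candidates2 :=
    (PySem.List.enumerate (PySem.List.slice allowed none (some limit)) 0).foldl
      (fun cands p => cands.filter (keepB p.1 p.2)) candidates
  PySem.List.len candidates2

-- ===== PRECONDITION & SPEC =====
-- Pre_ excludes patterns whose first ')' comes before any '(': there Python A raises
-- UnboundLocalError (smalllist unbound), and B raises the same way (group unbound).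
def Pre_process (casenum : Int) (casedata : Int × List String × String) : Prop :=
  ')' ∈ casedata.2.2.toList →
    ('(' ∈ casedata.2.2.toList ∧
      casedata.2.2.toList.idxOf '(' < casedata.2.2.toList.idxOf ')')
instance (casenum : Int) (casedata : Int × List String × String) : Decidable (Pre_process casenum casedata) := by unfold Pre_process; infer_instance

def pvWitness_process : Int × (Int × List String × String) :=
  (1, (2, ["ab", "bc", "ab"], "a(ab)"))

def Spec_process (casenum : Int) (casedata : Int × List String × String) (out : Int) : Prop := out = process_alt casenum casedata
instance (casenum : Int) (casedata : Int × List String × String) (out : Int) : Decidable (Spec_process casenum casedata out) := by unfold Spec_process; infer_instance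

-- ===== CLAIM (what is proved, stated in full; the proofs are below) =====
def Claim_equal_process : Prop := ∀ (casenum : Int) (casedata : Int × List String × String), Dom_process casenum casedata → Pre_process casenum casedata → Spec_process casenum casedata (process casenum casedata)

-- ===== LEMMAS AND PROOFS =====

-- chars allowed by a pattern element
def eltChars : PatElt → List Char
  | .chr c => [c]
  | .grp l => l

theorem memElt_eq (c : Char) (e : PatElt) : memElt c e = (eltChars e).contains c := by
  cases e with
  | chr d =>
    show (c == d) = [d].contains c
    rw [Bool.eq_iff_iff, beq_iff_eq, List.contains_iff_mem]; simp
  | grp l => rfl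

-- the two parses produce the same per-position character lists (for any state)
theorem parse_rel (cs : List Char) :
    ∀ (a : Bool) (small : List Char) (acc : List PatElt),
    ((cs.foldl
      (fun (st : Bool × List Char × List PatElt) c =>
        if c = '(' then (true, [], st.2.2)
        else if c = ')' then (false, st.2.1, st.2.2 ++ [PatElt.grp st.2.1])
        else if st.1 then (st.1, st.2.1 ++ [c], st.2.2)
        else (st.1, st.2.1, st.2.2 ++ [PatElt.chr c]))
      (a, small, acc)).2.2).map eltChars
    = acc.map eltChars ++ parseB a small cs := by
  induction cs with
  | nil => intro a small acc; simp [parseB]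
  | cons c rest ih =>
    intro a small acc
    by_cases h1 : c = '('
    · simp [h1, parseB, List.foldl_cons, ih]
    · by_cases h2 : c = ')'
      · subst h2
        simp only [List.foldl_cons, if_neg h1]
        rw [ih, parseB]
        simp [eltChars, h1]
      · by_cases h3 : a
        · simp [h1, h2, h3, parseB, List.foldl_cons, ih]
        · simp [h1, h2, h3, parseB, List.foldl_cons, ih, eltChars]


theorem transformA_map (cs : List Char) :
    (transformA cs).map eltChars = parseB false [] cs := by
  simpa using parse_rel cs false [] []

-- checkWordA is List.all over the zipped pairs
theorem checkWordA_eq_all (l : List (Char × PatElt)) :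
    checkWordA l = l.all (fun p => memElt p.1 p.2) := by
  induction l with
  | nil => rfl
  | cons p rest ih => cases p; simp [checkWordA, ih]

-- B's sequential per-position filtering = one filter by the conjunction
theorem foldl_filter_eq_filter_all {α β : Type} (ps : List β) (q : β → α → Bool) :
    ∀ ws : List α,
      ps.foldl (fun cands p => cands.filter (q p)) ws
        = ws.filter (fun w => ps.all (fun p => q p w)) := by
  induction ps with
  | nil => intro ws; simp
  | cons p rest ih => intro ws; simp [List.foldl_cons, ih, List.filter_filter, Bool.and_comm]

-- per word: A's zip check = B's enumerate check
theorem per_word (pats : List PatElt) (w : String) :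
    checkWordA (w.toList.zip pats)
      = (PySem.List.enumerate (pats.map eltChars) 0).all (fun p => keepB p.1 p.2 w) := by
  rw [checkWordA_eq_all, Bool.eq_iff_iff]
  simp only [List.all_eq_true]
  constructor
  · rintro h p hp
    rw [PySem.List.mem_enumerate_iff] at hp
    obtain ⟨k, hk, rfl⟩ := hp
    have hkp : k < pats.length := by simpa using hk
    simp only [keepB, Bool.or_eq_true, decide_eq_true_eq, zero_add]
    by_cases hkw : k < w.toList.length
    · right
      rw [PySem.Str.pyGet?_natCast, List.getElem?_eq_getElem hkw]
      have := h (w.toList[k], pats[k]) (by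
        rw [List.mem_iff_getElem]
        refine ⟨k, by rw [List.length_zip]; omega, by simp⟩)
      rw [memElt_eq] at this
      simpa [List.getElem_map] using this
    · left
      rw [PySem.Str.len_eq]
      omega
  · rintro h ⟨c, e⟩ hp
    rw [List.mem_iff_getElem] at hp
    obtain ⟨k, hk, hpe⟩ := hp
    simp only [List.length_zip, lt_inf_iff] at hk
    obtain ⟨hkw, hkp⟩ := hk
    have hc : c = w.toList[k] := by simpa using congrArg Prod.fst hpe.symm
    have he : e = pats[k] := by simpa using congrArg Prod.snd hpe.symm
    have hk' : k < (pats.map eltChars).length := by simpa using hkp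
    have hmem : ((0 : Int) + k, (pats.map eltChars)[k]) ∈
        PySem.List.enumerate (pats.map eltChars) 0 := by
      rw [PySem.List.mem_enumerate_iff]
      exact ⟨k, hk', rfl⟩
    have hb := h _ hmem
    simp only [keepB, Bool.or_eq_true, decide_eq_true_eq, zero_add] at hb
    rcases hb with hlen | hget
    · exfalso
      rw [PySem.Str.len_eq] at hlen
      omega
    · rw [PySem.Str.pyGet?_natCast, List.getElem?_eq_getElem hkw] at hget
      rw [memElt_eq, hc, he]
      simpa [List.getElem_map] using hget

-- positions past the word's length keep it, so truncating the pattern at the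
-- longest word's length does not change which words survive
theorem all_take (allowed : List (List Char)) (L : Nat) (w : String)
    (hw : w.toList.length ≤ L) :
    (PySem.List.enumerate (allowed.take L) 0).all (fun p => keepB p.1 p.2 w)
      = (PySem.List.enumerate allowed 0).all (fun p => keepB p.1 p.2 w) := by
  conv_rhs => rw [← List.take_append_drop L allowed]
  rw [PySem.List.enumerate_append, List.all_append]
  have hdrop : (PySem.List.enumerate (allowed.drop L)
      (0 + ((allowed.take L).length : Int))).all (fun p => keepB p.1 p.2 w) = true := by
    rw [List.all_eq_true]
    rintro p hp
    rw [PySem.List.mem_enumerate_iff] at hp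
    obtain ⟨k, hk, rfl⟩ := hp
    have hL : L < allowed.length := by
      rw [List.length_drop] at hk; omega
    simp only [keepB, Bool.or_eq_true, decide_eq_true_eq]
    left
    rw [PySem.Str.len_eq]
    simp only [List.length_take]
    omega
  rw [hdrop, Bool.and_true]

-- A's counting foldl is a countP, and B's length-of-filter is the same countP
theorem counts_eq (casenum : Int) (casedata : Int × List String × String) :
    process casenum casedata = process_alt casenum casedata := by
  unfold process process_alt
  dsimp only
  set limit := casedata.2.1.foldl (fun m w => max m (PySem.Str.len w)) 0 with hlimdef
  have hmax := PySem.List.le_foldl_max_int casedata.2.1 PySem.Str.len 0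
  have h0 : 0 ≤ limit := hmax.1
  rw [show limit = ((limit.toNat : Nat) : Int) from (Int.toNat_of_nonneg h0).symm,
      PySem.List.slice_to_natCast]
  rw [PySem.List.foldl_count_if, foldl_filter_eq_filter_all, PySem.List.len_eq,
      ← List.countP_eq_length_filter, zero_add]
  congr 1
  refine List.countP_congr (fun w hw => ?_)
  have hwlen : w.toList.length ≤ limit.toNat := by
    have := hmax.2 w hw
    rw [PySem.Str.len_eq] at this
    omega
  rw [per_word, transformA_map, ← all_take (parseB false [] casedata.2.2.toList) limit.toNat w hwlen]

-- ===== VERDICT (by name: the statement is the Claim_ definition above) =====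
theorem process_spec : Claim_equal_process := by
  intro casenum casedata _ _
  exact counts_eq casenum casedata
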